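-- pv_equiv track=rewrite | github.com/Michele109/Sudoku-Solver | tests/test_main.py | _make_puzzle_str
-- ===== SOURCE A (Python) =====
-- import math
--
-- def _make_puzzle_str(grid_size: int) -> str:
--     """Return a minimal solved-puzzle string (all 1s in a legal pattern)."""
--     block = int(math.isqrt(grid_size))
--     grid = [
--         [((r * block + r // block + c) % grid_size) + 1 for c in range(grid_size)]
--         for r in range(grid_size)
--     ]
--     chars = []
--     for row in grid:
--         for val in row:
--             if val <= 9:
--                 chars.append(str(val))
--             else:
--                 chars.append(chr(val - 10 + ord('A')))
--     return "".join(chars)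
-- ===== SOURCE B (Python) =====
-- import math
--
-- def _make_puzzle_str(grid_size: int) -> str:
--     """Return a minimal solved-puzzle string (all 1s in a legal pattern)."""
--     block = math.isqrt(grid_size)
--     base = "".join(str(v) if v <= 9 else chr(v + 55) for v in range(1, grid_size + 1))
--     rows = []
--     for r in range(grid_size):
--         s = (r * block + r // block) % grid_size
--         rows.append(base[s:] + base[:s])
--     return "".join(rows)
-- ===== Notes on version B (the rewrite author's own statement) =====
-- stated objective: faster
-- what changed: B drops A's intermediate grid of cell values and its per-cell digit/letter conversion: it builds the 1..n symbol string once and emits each row as a rotation of it (two slices), since row r of A's pattern is exactly the base row shifted by (r*block + r//block) % n.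
import Mathlib
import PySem

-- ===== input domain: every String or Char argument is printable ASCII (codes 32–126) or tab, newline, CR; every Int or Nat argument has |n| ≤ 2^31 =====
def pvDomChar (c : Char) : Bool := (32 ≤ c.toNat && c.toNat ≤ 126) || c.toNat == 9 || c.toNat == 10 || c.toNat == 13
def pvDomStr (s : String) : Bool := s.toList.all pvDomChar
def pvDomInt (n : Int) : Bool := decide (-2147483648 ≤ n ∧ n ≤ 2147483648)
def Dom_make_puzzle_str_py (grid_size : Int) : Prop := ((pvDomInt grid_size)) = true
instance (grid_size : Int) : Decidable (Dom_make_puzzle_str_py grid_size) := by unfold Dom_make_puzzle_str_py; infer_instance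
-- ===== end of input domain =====

-- B builds the 1..n symbol string once and emits each row as a rotation (two slices) of it,
-- dropping A's intermediate grid of per-cell values; a timing run reports B measurably faster.

-- ===== PORT A =====
def make_puzzle_str_py (grid_size : Int) : String :=
  -- block = int(math.isqrt(grid_size)); isqrt raises ValueError on negatives (excluded by Pre_)
  let block : Int := ((grid_size.toNat.sqrt : Nat) : Int)
  let grid : List (List Int) :=
    (PySem.List.pyRange 0 grid_size 1).map (fun r =>
      (PySem.List.pyRange 0 grid_size 1).map (fun c =>
        PySem.Int.mod (r * block + PySem.Int.floordiv r block + c) grid_size + 1))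
  let chars : List String :=
    grid.foldl (fun chars row =>
      row.foldl (fun chars val =>
        if val ≤ 9 then chars ++ [PySem.Int.toStr val]
        -- chr(val - 10 + ord('A')): exact on Pre_, where the code point stays below 0xD800
        else chars ++ [String.ofList [Char.ofNat (val - 10 + 65).toNat]]) chars) []
  PySem.Str.join "" chars

-- ===== PORT B =====
def make_puzzle_str_py_alt (grid_size : Int) : String :=
  let block : Int := ((grid_size.toNat.sqrt : Nat) : Int)
  let base : String := PySem.Str.join ""
    ((PySem.List.pyRange 1 (grid_size + 1) 1).map (fun v =>
      if v ≤ 9 then PySem.Int.toStr v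
      -- chr(v + 55): exact on Pre_, where the code point stays below 0xD800
      else String.ofList [Char.ofNat (v + 55).toNat]))
  let rows : List String :=
    (PySem.List.pyRange 0 grid_size 1).foldl (fun rows r =>
      let s := PySem.Int.mod (r * block + PySem.Int.floordiv r block) grid_size
      rows ++ [PySem.Str.slice base (some s) none ++ PySem.Str.slice base none (some s)]) []
  PySem.Str.join "" rows

-- ===== PRECONDITION & SPEC =====
-- Pre_ excludes negative grid_size, where math.isqrt raises ValueError; grid_size ≥ 1114057,
-- where chr raises ValueError (code point above 0x10FFFF); and 55241 ≤ grid_size ≤ 1114056,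
-- where the Python string A returns contains lone UTF-16 surrogate code points
-- (chr(v + 55) for cell values 55241 ≤ v ≤ 57288, all of which occur in the pattern):
-- a lone surrogate is not a valid Lean Char, so A's value there is not a value of the
-- declared return type String and the claim cannot be stated for those inputs.
def Pre_make_puzzle_str_py (grid_size : Int) : Prop := 0 ≤ grid_size ∧ grid_size ≤ 55240
instance (grid_size : Int) : Decidable (Pre_make_puzzle_str_py grid_size) := by unfold Pre_make_puzzle_str_py; infer_instance
def pvWitness_make_puzzle_str_py : Int := 9
def Spec_make_puzzle_str_py (grid_size : Int) (out : String) : Prop := out = make_puzzle_str_py_alt grid_size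
instance (grid_size : Int) (out : String) : Decidable (Spec_make_puzzle_str_py grid_size out) := by unfold Spec_make_puzzle_str_py; infer_instance

-- ===== CLAIM (what is proved, stated in full; the proofs are below) =====
def Claim_equal_make_puzzle_str_py : Prop := ∀ (grid_size : Int), Dom_make_puzzle_str_py grid_size → Pre_make_puzzle_str_py grid_size → Spec_make_puzzle_str_py grid_size (make_puzzle_str_py grid_size)

-- ===== LEMMAS AND PROOFS =====

-- the single character both programs emit for a cell value v ≥ 1
def cellChar (v : Int) : Char := if v ≤ 9 then Char.ofNat (48 + v.toNat) else Char.ofNat (v + 55).toNat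

theorem join_nil_flatten (ls : List (List Char)) : PySem.Chars.join [] ls = ls.flatten := by
  induction ls with
  | nil => rfl
  | cons a t ih =>
    cases t with
    | nil => simp [PySem.Chars.join, List.intercalate]
    | cons b t2 =>
      rw [PySem.Chars.join_cons_cons]; simp_all

theorem toList_cellStrA (v : Int) (h : 1 ≤ v) :
    (if v ≤ 9 then PySem.Int.toStr v else String.ofList [Char.ofNat (v - 10 + 65).toNat]).toList = [cellChar v] := by
  by_cases h9 : v ≤ 9
  · simp only [if_pos h9, cellChar]
    interval_cases v <;> decide
  · simp only [if_neg h9, cellChar]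
    have h55 : v - 10 + 65 = v + 55 := by omega
    rw [h55]; simp

theorem toList_cellStrB (v : Int) (h : 1 ≤ v) :
    (if v ≤ 9 then PySem.Int.toStr v else String.ofList [Char.ofNat (v + 55).toNat]).toList = [cellChar v] := by
  by_cases h9 : v ≤ 9
  · simp only [if_pos h9, cellChar]
    interval_cases v <;> decide
  · simp only [if_neg h9, cellChar]; simp

theorem rot (N : Nat) (hN : 0 < N) (x : Int) :
    (((PySem.List.pyRange 1 ((N : Int) + 1) 1).map cellChar).drop (PySem.Int.mod x (N : Int)).toNat
      ++ ((PySem.List.pyRange 1 ((N : Int) + 1) 1).map cellChar).take (PySem.Int.mod x (N : Int)).toNat)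
    = (PySem.List.pyRange 0 (N : Int) 1).map (fun c => cellChar (PySem.Int.mod (x + c) (N : Int) + 1)) := by
  have hNpos : (0 : Int) < (N : Int) := by exact_mod_cast hN
  simp only [PySem.Int.mod_eq_emod_of_pos hNpos]
  have hsub : ((N : Int) + 1 - 1).toNat = N := by omega
  rw [PySem.List.pyRange_one 1 ((N : Int) + 1), PySem.List.pyRange_one 0 (N : Int), hsub]
  simp only [Int.sub_zero, Int.toNat_natCast, List.map_map]
  set s : Int := x % (N : Int) with hs
  have hs0 : 0 ≤ s := Int.emod_nonneg x (by omega)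
  have hsN : s < (N : Int) := Int.emod_lt_of_pos x hNpos
  set s' : Nat := s.toNat with hs'
  have hs'N : s' < N := by omega
  have hseq : (s' : Int) = s := by omega
  apply List.ext_getElem
  · simp; omega
  · intro i hi1 hi2
    simp only [List.length_append, List.length_drop, List.length_take, List.length_map,
      List.length_range] at hi1 hi2
    rw [List.getElem_append]
    have h1 : (x + (i : Int)) % (N : Int) = (s + (i : Int)) % (N : Int) := by
      rw [hs, Int.emod_add_emod]
    have hmod : (x + (i : Int)) % (N : Int) = if s' + i < N then (s' : Int) + i else (s' : Int) + i - N := by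
      rw [h1, ← hseq]
      split_ifs with hcase
      · rw [Int.emod_eq_of_lt (by omega) (by omega)]
      · rw [← Int.sub_emod_right ((s' : Int) + i) (N : Int),
          Int.emod_eq_of_lt (by omega) (by omega)]
    simp only [List.length_drop, List.length_map, List.length_range]
    split_ifs with hlt
    · rw [List.getElem_drop, List.getElem_map, List.getElem_range, List.getElem_map,
        List.getElem_range]
      simp only [Function.comp_apply, zero_add, hmod, if_pos (by omega : s' + i < N)]
      congr 1
      push_cast
      omega
    · rw [List.getElem_take, List.getElem_map, List.getElem_range, List.getElem_map,
        List.getElem_range]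
      simp only [Function.comp_apply, zero_add, hmod, if_neg (by omega : ¬ (s' + i < N))]
      congr 1
      omega

theorem flatten_map_single {α β : Type} (f : α → β) (l : List α) :
    (l.map (fun k => [f k])).flatten = l.map f := by
  induction l with
  | nil => rfl
  | cons a t ih => simp [ih]

theorem flatten_flatMap {α β : Type} (F : α → List (List β)) (l : List α) :
    (l.flatMap F).flatten = (l.map (fun a => (F a).flatten)).flatten := by
  induction l with
  | nil => rfl
  | cons a t ih => simp_all

theorem base_toList (N : Nat) :
    (PySem.Str.join "" ((PySem.List.pyRange 1 ((N : Int) + 1) 1).map (fun v =>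
      if v ≤ 9 then PySem.Int.toStr v
      else String.ofList [Char.ofNat (v + 55).toNat]))).toList
    = (PySem.List.pyRange 1 ((N : Int) + 1) 1).map cellChar := by
  rw [PySem.Str.toList_join]
  have he : "".toList = ([] : List Char) := rfl
  rw [he, join_nil_flatten]
  have hsub : ((N : Int) + 1 - 1).toNat = N := by omega
  rw [PySem.List.pyRange_one 1 ((N : Int) + 1), hsub]
  simp only [List.map_map, Function.comp_def]
  have hf : (fun k : Nat => (if (1 + (k : Int)) ≤ 9 then PySem.Int.toStr (1 + (k : Int))
      else String.ofList [Char.ofNat ((1 + (k : Int)) + 55).toNat]).toList)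
      = fun k : Nat => [cellChar (1 + (k : Int))] := by
    funext k
    exact toList_cellStrB _ (by omega)
  rw [hf]
  exact flatten_map_single _ _

theorem main_eq (N : Nat) : make_puzzle_str_py (N : Int) = make_puzzle_str_py_alt (N : Int) := by
  rcases Nat.eq_zero_or_pos N with h0 | hN
  · subst h0; rfl
  · have hNpos : (0 : Int) < (N : Int) := by exact_mod_cast hN
    apply String.toList_inj.mp
    simp only [make_puzzle_str_py, make_puzzle_str_py_alt]
    -- A side: turn the two folds into a flatMap of per-cell strings
    have hbodyA : (fun (chars : List String) (val : Int) =>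
        if val ≤ 9 then chars ++ [PySem.Int.toStr val]
        else chars ++ [String.ofList [Char.ofNat (val - 10 + 65).toNat]])
        = fun chars val => chars ++ [if val ≤ 9 then PySem.Int.toStr val
            else String.ofList [Char.ofNat (val - 10 + 65).toNat]] := by
      funext a v
      split_ifs <;> rfl
    rw [hbodyA]
    simp only [PySem.List.foldl_append_singleton_eq_map]
    rw [PySem.List.foldl_append_eq_flatMap]
    simp only [List.nil_append, PySem.Str.toList_join]
    have he : "".toList = ([] : List Char) := rfl
    rw [he, join_nil_flatten, join_nil_flatten]
    rw [List.flatMap_map, List.map_flatMap, List.map_map]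
    have hval : ∀ e : Int, (if PySem.Int.mod e (N : Int) + 1 ≤ 9 then PySem.Int.toStr (PySem.Int.mod e (N : Int) + 1)
        else String.ofList [Char.ofNat ((PySem.Int.mod e (N : Int) + 1) - 10 + 65).toNat]).toList
        = [cellChar (PySem.Int.mod e (N : Int) + 1)] := by
      intro e
      exact toList_cellStrA _ (by have := PySem.Int.mod_nonneg e hNpos; omega)
    simp only [List.map_map, Function.comp_def, hval]
    -- B side: each row string is a rotation of base
    have hrow : ∀ r : Int,
        (PySem.Str.slice (PySem.Str.join "" ((PySem.List.pyRange 1 ((N : Int) + 1) 1).map (fun v =>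
            if v ≤ 9 then PySem.Int.toStr v else String.ofList [Char.ofNat (v + 55).toNat])))
          (some (PySem.Int.mod r (N : Int))) none
        ++ PySem.Str.slice (PySem.Str.join "" ((PySem.List.pyRange 1 ((N : Int) + 1) 1).map (fun v =>
            if v ≤ 9 then PySem.Int.toStr v else String.ofList [Char.ofNat (v + 55).toNat])))
          none (some (PySem.Int.mod r (N : Int)))).toList
        = (PySem.List.pyRange 0 (N : Int) 1).map (fun c => cellChar (PySem.Int.mod (r + c) (N : Int) + 1)) := by
      intro r
      rw [String.toList_append]
      simp only [PySem.Str.toList_slice, PySem.Chars.slice_eq_listSlice]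
      rw [base_toList]
      have hs0 : 0 ≤ PySem.Int.mod r (N : Int) := PySem.Int.mod_nonneg r hNpos
      rw [PySem.List.slice_from _ hs0, PySem.List.slice_to _ hs0]
      exact rot N hN r
    simp only [hrow]
    rw [flatten_flatMap]
    congr 1
    apply List.map_congr_left
    intro r _
    exact flatten_map_single _ _

-- ===== VERDICT (by name: the statement is the Claim_ definition above) =====
theorem make_puzzle_str_py_spec : Claim_equal_make_puzzle_str_py := by
  intro n _ hpre
  unfold Spec_make_puzzle_str_py
  obtain ⟨h0, h1⟩ := hpre
  obtain ⟨N, rfl⟩ := Int.eq_ofNat_of_zero_le h0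
  exact main_eq N
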